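-- pv_equiv track=rewrite | github.com/dinocom33/Programming-Fundamentals-with-Python-September-2022 | 5-Lists-Advanced/2-Exercises/anonymous_threat.py | divide_elements
-- ===== SOURCE A (Python) =====
-- def divide_elements(given_list, first_index, divisor):
--     current_length = len(given_list[first_index])
--     current_string = given_list.pop(first_index)
--     divided_elements = []
--     for n in range(divisor - 1):
--         divided_elements.append(current_string[:current_length // divisor])
--         current_string = current_string[current_length // divisor:]
--     divided_elements.append(current_string)
--     for e in divided_elements[::-1]:
--         given_list.insert(first_index, e)
--     return given_list
-- ===== SOURCE B (Python) =====
-- def divide_elements(given_list, first_index, divisor):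
--     s = given_list[first_index]
--     i = first_index if first_index >= 0 else first_index + len(given_list)
--     if divisor >= 2:
--         chunk = len(s) // divisor
--         parts = [s[k * chunk:(k + 1) * chunk] for k in range(divisor - 1)]
--         parts.append(s[(divisor - 1) * chunk:])
--     else:
--         parts = [s]
--     given_list[i:i + 1] = parts
--     return given_list
-- ===== Notes on version B (the rewrite author's own statement) =====
-- stated objective: faster
-- what changed: B computes each part by direct index arithmetic (k*chunk slices of the untouched string) and splices all parts in with one slice assignment, instead of A's shrinking-string accumulator loop followed by reversed one-by-one list.insert calls.
-- intended difference: For negative in-range first_index (except first_index = -len(given_list) with divisor <= 2, where the clamped inserts still land right), A pops the element but re-inserts the parts at the still-negative index, scattering them reversed before the wrong position; B splices the parts, in order, at the position of the popped element, which is the intended split. — e.g. on divide_elements(["ab", "cd"], -1, 2): A returns ["d", "c", "ab"], B returns ["ab", "c", "d"]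
import Mathlib
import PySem

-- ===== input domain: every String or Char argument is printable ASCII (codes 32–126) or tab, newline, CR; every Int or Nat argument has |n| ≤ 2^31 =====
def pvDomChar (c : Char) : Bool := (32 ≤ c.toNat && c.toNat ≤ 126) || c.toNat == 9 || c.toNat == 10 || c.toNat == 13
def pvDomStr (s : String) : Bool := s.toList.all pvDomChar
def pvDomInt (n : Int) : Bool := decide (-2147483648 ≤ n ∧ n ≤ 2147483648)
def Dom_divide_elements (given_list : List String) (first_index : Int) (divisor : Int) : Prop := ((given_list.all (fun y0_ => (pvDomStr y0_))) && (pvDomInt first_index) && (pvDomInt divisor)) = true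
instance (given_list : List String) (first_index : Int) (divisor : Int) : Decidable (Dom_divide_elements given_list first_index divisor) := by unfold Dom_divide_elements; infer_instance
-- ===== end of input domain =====

-- B splits the indexed string by direct index arithmetic and splices the parts in with one slice
-- assignment, instead of A's shrinking-string loop plus reversed one-by-one list.insert calls
-- (objective: faster, measured). Both Pythons mutate given_list in place;
-- the equivalence proved here is about the RETURN value.

-- ===== PORT A =====
def divide_elements (given_list : List String) (first_index : Int) (divisor : Int) : List String :=
  -- current_length = len(given_list[first_index])  (IndexError = none, excluded by Pre_)
  let current_length : Int :=
    match PySem.List.pyGet? given_list first_index with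
    | some s => PySem.Str.len s
    | none => 0
  -- current_string = given_list.pop(first_index)
  match PySem.List.pop? given_list first_index with
  | none => []  -- IndexError, excluded by Pre_
  | some (cs0, popped_list) =>
    -- for n in range(divisor - 1): append current_string[:cl//div]; current_string = current_string[cl//div:]
    let st :=
      (PySem.List.pyRange 0 (divisor - 1) 1).foldl
        (fun (st : List String × String) _ =>
          (st.1 ++ [PySem.Str.slice st.2 none (some (PySem.Int.floordiv current_length divisor))],
           PySem.Str.slice st.2 (some (PySem.Int.floordiv current_length divisor)) none))
        ([], cs0)
    let divided_elements := st.1 ++ [st.2]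
    -- for e in divided_elements[::-1]: given_list.insert(first_index, e)
    ((PySem.List.slice? divided_elements none none (-1)).getD []).foldl
      (fun gl e => PySem.List.insert gl first_index e) popped_list

-- ===== PORT B =====
def divide_elements_alt (given_list : List String) (first_index : Int) (divisor : Int) : List String :=
  match PySem.List.pyGet? given_list first_index with
  | none => []  -- IndexError, excluded by Pre_
  | some s =>
    -- i = first_index if first_index >= 0 else first_index + len(given_list)
    let i : Int := if 0 ≤ first_index then first_index else first_index + given_list.length
    let parts : List String :=
      if 2 ≤ divisor then
        let chunk := PySem.Int.floordiv (PySem.Str.len s) divisor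
        ((PySem.List.pyRange 0 (divisor - 1) 1).map
            (fun k => PySem.Str.slice s (some (k * chunk)) (some ((k + 1) * chunk))))
          ++ [PySem.Str.slice s (some ((divisor - 1) * chunk)) none]
      else [s]
    -- given_list[i:i+1] = parts  (0 ≤ i here, so the slice assignment is take/parts/drop)
    PySem.List.slice given_list none (some i) ++ parts
      ++ PySem.List.slice given_list (some (i + 1)) none

-- ===== PRECONDITION & SPEC =====
-- Pre_: exactly the indices Python accepts; outside it both Pythons raise IndexError.
def Pre_divide_elements (given_list : List String) (first_index : Int) (divisor : Int) : Prop :=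
  -(given_list.length : Int) ≤ first_index ∧ first_index < (given_list.length : Int)
instance (given_list : List String) (first_index : Int) (divisor : Int) : Decidable (Pre_divide_elements given_list first_index divisor) := by unfold Pre_divide_elements; infer_instance

def pvWitness_divide_elements : List String × Int × Int := (["abcdef", "xy"], 0, 3)

-- For negative in-range first_index (except first_index = -len(given_list) with divisor ≤ 2, where
-- the clamped inserts still land right) A pops the element but re-inserts the parts at the
-- still-negative index, scattering them reversed before the wrong position; B splices the parts,
-- in order, at the position of the popped element, which is the intended split.
def D_divide_elements (given_list : List String) (first_index : Int) (divisor : Int) : Prop :=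
  first_index < 0 ∧ ¬(first_index + (given_list.length : Int) = 0 ∧ divisor ≤ 2)
instance (given_list : List String) (first_index : Int) (divisor : Int) : Decidable (D_divide_elements given_list first_index divisor) := by unfold D_divide_elements; infer_instance

def Spec_divide_elements (given_list : List String) (first_index : Int) (divisor : Int) (out : List String) : Prop := ¬ D_divide_elements given_list first_index divisor → out = divide_elements_alt given_list first_index divisor
instance (given_list : List String) (first_index : Int) (divisor : Int) (out : List String) : Decidable (Spec_divide_elements given_list first_index divisor out) := by unfold Spec_divide_elements; infer_instance

def pvDiffWitness_divide_elements : List String × Int × Int := (["ab", "cd"], -1, 2)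
def pvDiffWitnessOut_divide_elements : (List String) × (List String) :=
  (["d", "c", "ab"], ["ab", "c", "d"])

-- ===== CLAIM (what is proved, stated in full; the proofs are below) =====
def Claim_unchanged_divide_elements : Prop := ∀ (given_list : List String) (first_index : Int) (divisor : Int), Dom_divide_elements given_list first_index divisor → Pre_divide_elements given_list first_index divisor → Spec_divide_elements given_list first_index divisor (divide_elements given_list first_index divisor)
def Claim_changed_divide_elements : Prop := Dom_divide_elements (pvDiffWitness_divide_elements.1) (pvDiffWitness_divide_elements.2.1) (pvDiffWitness_divide_elements.2.2) ∧ Pre_divide_elements (pvDiffWitness_divide_elements.1) (pvDiffWitness_divide_elements.2.1) (pvDiffWitness_divide_elements.2.2) ∧ D_divide_elements (pvDiffWitness_divide_elements.1) (pvDiffWitness_divide_elements.2.1) (pvDiffWitness_divide_elements.2.2) ∧ divide_elements (pvDiffWitness_divide_elements.1) (pvDiffWitness_divide_elements.2.1) (pvDiffWitness_divide_elements.2.2) = pvDiffWitnessOut_divide_elements.1 ∧ divide_elements_alt (pvDiffWitness_divide_elements.1) (pvDiffWitness_divide_elements.2.1) (pvDiffWitness_divide_elements.2.2) = pvDiffWitnessOut_divide_elements.2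 ∧ pvDiffWitnessOut_divide_elements.1 ≠ pvDiffWitnessOut_divide_elements.2

-- ===== LEMMAS AND PROOFS =====

theorem insert_clamp_zero {α : Type} (xs : List α) (i : Int) (v : α)
    (h : i + (xs.length : Int) ≤ 0) : PySem.List.insert xs i v = v :: xs := by
  unfold PySem.List.insert PySem.List.sliceIndices
  by_cases hi : i < 0
  · simp [hi]
    rw [max_eq_right (by omega)]
    simp
  · have h0 : i = 0 := by omega
    have hl : xs.length = 0 := by omega
    simp [h0, List.eq_nil_of_length_eq_zero hl]

theorem pyIdx_neg_len (n : Nat) (hn : 0 < n) :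
    PySem.List.pyIdx? n (-(n : Int)) = some 0 := by
  unfold PySem.List.pyIdx?
  rw [if_neg (by omega), if_pos (by omega)]
  simp

theorem eraseIdx_take {α : Type} (l : List α) (m : Nat) (hm : m ≤ l.length) :
    (l.eraseIdx m).take m = l.take m := by
  rw [List.eraseIdx_eq_take_drop_succ, List.take_append]
  simp [Nat.min_eq_left hm]

theorem eraseIdx_drop {α : Type} (l : List α) (m : Nat) (hm : m ≤ l.length) :
    (l.eraseIdx m).drop m = l.drop (m + 1) := by
  rw [List.eraseIdx_eq_take_drop_succ, List.drop_append]
  simp [Nat.min_eq_left hm]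

theorem divide_insert_loop {α : Type} (ps : List α) (L : List α) (m : Nat) (hm : m ≤ L.length) :
    ps.reverse.foldl (fun gl e => PySem.List.insert gl (m : Int) e) L
      = L.take m ++ ps ++ L.drop m := by
  induction ps with
  | nil => simp
  | cons p ps ih =>
    rw [List.reverse_cons, List.foldl_append, ih]
    simp only [List.foldl_cons, List.foldl_nil]
    have hlen : m ≤ (L.take m ++ ps ++ L.drop m).length := by
      simp; omega
    rw [PySem.List.insert_natCast _ m p hlen]
    rw [List.append_assoc, List.take_append, List.drop_append]
    simp [List.length_take, Nat.min_eq_left hm]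

theorem divide_chunk_loop (s : String) (cI : Int) (c : Nat) (hc : cI = (c : Int)) (q : Nat) :
    (PySem.List.pyRange 0 (q : Int) 1).foldl
      (fun (st : List String × String) _ =>
        (st.1 ++ [PySem.Str.slice st.2 none (some cI)], PySem.Str.slice st.2 (some cI) none))
      ([], s)
    = ((List.range q).map (fun k =>
          PySem.Str.slice s (some ((k * c : Nat) : Int)) (some (((k + 1) * c : Nat) : Int))),
       PySem.Str.slice s (some ((q * c : Nat) : Int)) none) := by
  subst hc
  induction q with
  | zero =>
    rw [PySem.List.pyRange_one_eq_nil (by omega)]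
    simp only [List.foldl_nil, List.range_zero, List.map_nil, Nat.zero_mul]
    refine Prod.ext rfl ?_
    rw [← String.toList_inj]
    simp only [PySem.Str.toList_slice, PySem.Chars.slice]
    rw [PySem.List.slice_from_natCast]
    simp
  | succ q ih =>
    have hcast : ((q + 1 : Nat) : Int) = (q : Int) + 1 := by push_cast; ring
    rw [hcast, PySem.List.pyRange_one_succ_right (by omega), List.foldl_append, ih]
    simp only [List.foldl_cons, List.foldl_nil]
    refine Prod.ext ?_ ?_
    · simp only [List.range_succ, List.map_append, List.map_cons, List.map_nil]
      congr 1
      congr 1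
      rw [← String.toList_inj]
      simp only [PySem.Str.toList_slice, PySem.Chars.slice]
      rw [PySem.List.slice_from_natCast, PySem.List.slice_to_natCast, PySem.List.slice_natCast]
      rw [Nat.succ_mul]
      congr 1
      omega
    · rw [← String.toList_inj]
      simp only [PySem.Str.toList_slice, PySem.Chars.slice]
      rw [PySem.List.slice_from_natCast, PySem.List.slice_from_natCast,
        PySem.List.slice_from_natCast, List.drop_drop]
      congr 1
      ring

theorem divide_neg_case (gl : List String) (d : Int) (hn : 0 < gl.length) (hdle : d ≤ 2) :
    divide_elements gl (-(gl.length : Int)) d = divide_elements_alt gl (-(gl.length : Int)) d := by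
  have hget : PySem.List.pyGet? gl (-(gl.length : Int)) = some gl[0] := by
    unfold PySem.List.pyGet?
    rw [pyIdx_neg_len _ hn]
    simp [List.getElem?_eq_getElem hn]
  have hpop : PySem.List.pop? gl (-(gl.length : Int)) = some (gl[0], gl.eraseIdx 0) := by
    unfold PySem.List.pop?
    rw [pyIdx_neg_len _ hn]
    simp [List.getElem?_eq_getElem hn]
  have hEnil : (gl.eraseIdx 0).length = gl.length - 1 := by
    rw [List.length_eraseIdx]; simp [hn]
  unfold divide_elements divide_elements_alt
  rw [hget, hpop]
  show ((PySem.List.slice? ((((PySem.List.pyRange 0 (d - 1) 1).foldl (fun (st : List String × String) _ =>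
        (st.1 ++ [PySem.Str.slice st.2 none (some (PySem.Int.floordiv (PySem.Str.len gl[0]) d))],
         PySem.Str.slice st.2 (some (PySem.Int.floordiv (PySem.Str.len gl[0]) d)) none)) ([], gl[0])).1
          ++ [((PySem.List.pyRange 0 (d - 1) 1).foldl (fun (st : List String × String) _ =>
        (st.1 ++ [PySem.Str.slice st.2 none (some (PySem.Int.floordiv (PySem.Str.len gl[0]) d))],
         PySem.Str.slice st.2 (some (PySem.Int.floordiv (PySem.Str.len gl[0]) d)) none)) ([], gl[0])).2])) none none (-1)).getD
        []).foldl (fun gl_1 e => PySem.List.insert gl_1 (-(gl.length : Int)) e) (gl.eraseIdx 0)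
      = PySem.List.slice gl none (some (if (0:Int) ≤ -(gl.length : Int) then -(gl.length : Int)
            else -(gl.length : Int) + (gl.length : Int)))
        ++ (if (2:Int) ≤ d then
              (PySem.List.pyRange 0 (d - 1) 1).map
                  (fun k => PySem.Str.slice gl[0]
                    (some (k * PySem.Int.floordiv (PySem.Str.len gl[0]) d))
                    (some ((k + 1) * PySem.Int.floordiv (PySem.Str.len gl[0]) d)))
                ++ [PySem.Str.slice gl[0]
                      (some ((d - 1) * PySem.Int.floordiv (PySem.Str.len gl[0]) d)) none]
            else [gl[0]])
        ++ PySem.List.slice gl (some ((if (0:Int) ≤ -(gl.length : Int) then -(gl.length : Int)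
              else -(gl.length : Int) + (gl.length : Int)) + 1)) none
  rw [if_neg (by omega : ¬ ((0:Int) ≤ -(gl.length : Int)))]
  rw [show -(gl.length : Int) + (gl.length : Int) = 0 by ring]
  rw [PySem.List.slice_to gl (by omega : (0:Int) ≤ 0), PySem.List.slice_from gl (by omega : (0:Int) ≤ 0 + 1)]
  have hlen0 : (0:Int) ≤ PySem.Str.len gl[0] := by rw [PySem.Str.len_eq]; positivity
  by_cases hd2 : (2:Int) ≤ d
  · have hd : d = 2 := by omega
    subst hd
    have hr : PySem.List.pyRange 0 (2 - 1) 1 = [(0:Int)] := by decide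
    rw [hr]
    simp only [List.foldl_cons, List.foldl_nil, List.map_cons, List.map_nil, List.nil_append]
    rw [PySem.List.slice?_none_none_neg_one, Option.getD_some]
    simp only [List.reverse_cons, List.reverse_nil, List.nil_append, List.cons_append,
      List.foldl_cons, List.foldl_nil]
    rw [insert_clamp_zero (gl.eraseIdx 0) _ _ (by rw [hEnil]; omega)]
    rw [insert_clamp_zero _ _ _ (by simp only [List.length_cons, hEnil]; omega)]
    norm_num
    rw [← String.toList_inj]
    simp only [PySem.Str.toList_slice, PySem.Chars.slice, PySem.List.slice_zero_start]
  · rw [if_neg hd2, PySem.List.pyRange_one_eq_nil (by omega)]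
    simp only [List.foldl_nil, List.nil_append]
    rw [PySem.List.slice?_none_none_neg_one, Option.getD_some]
    simp only [List.reverse_cons, List.reverse_nil, List.nil_append, List.foldl_cons,
      List.foldl_nil]
    rw [insert_clamp_zero (gl.eraseIdx 0) _ _ (by rw [hEnil]; omega)]
    norm_num

-- ===== VERDICT (by name: the statement is the Claim_ definition above) =====
set_option maxHeartbeats 1000000 in
theorem divide_elements_spec : Claim_unchanged_divide_elements := by
  intro gl f d hdom hpre
  unfold Spec_divide_elements
  intro hnd
  obtain ⟨hlo, hhi⟩ := hpre
  by_cases hf : 0 ≤ f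
  · -- non-negative index: f = m
    unfold divide_elements divide_elements_alt
    have hfm : f = (f.toNat : Int) := by omega
    have hmlen : f.toNat < gl.length := by omega
    rw [hfm]
    rw [PySem.List.pyGet?_natCast, PySem.List.pop?_natCast gl f.toNat hmlen,
      List.getElem?_eq_getElem hmlen]
    show ((PySem.List.slice? ((((PySem.List.pyRange 0 (d - 1) 1).foldl _ ([], gl[f.toNat])).1 ++ [((PySem.List.pyRange 0 (d - 1) 1).foldl _ ([], gl[f.toNat])).2])) none none (-1)).getD []).foldl _ (gl.eraseIdx f.toNat)
      = PySem.List.slice gl none (some (if (0:Int) ≤ (f.toNat : Int) then (f.toNat : Int)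
            else (f.toNat : Int) + (gl.length : Int)))
        ++ (if (2:Int) ≤ d then
              (PySem.List.pyRange 0 (d - 1) 1).map
                  (fun k => PySem.Str.slice gl[f.toNat]
                    (some (k * PySem.Int.floordiv (PySem.Str.len gl[f.toNat]) d))
                    (some ((k + 1) * PySem.Int.floordiv (PySem.Str.len gl[f.toNat]) d)))
                ++ [PySem.Str.slice gl[f.toNat]
                      (some ((d - 1) * PySem.Int.floordiv (PySem.Str.len gl[f.toNat]) d)) none]
            else [gl[f.toNat]])
        ++ PySem.List.slice gl (some ((if (0:Int) ≤ (f.toNat : Int) then (f.toNat : Int)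
              else (f.toNat : Int) + (gl.length : Int)) + 1)) none
    rw [if_pos (show (0:Int) ≤ (f.toNat : Int) by positivity)]
    have hmE : f.toNat ≤ (gl.eraseIdx f.toNat).length := by
      rw [List.length_eraseIdx]; simp [hmlen]; omega
    have hlen0 : (0:Int) ≤ PySem.Str.len gl[f.toNat] := by
      rw [PySem.Str.len_eq]; positivity
    by_cases hd2 : (2:Int) ≤ d
    · have hq : d - 1 = (((d - 1).toNat : Nat) : Int) := by omega
      have hdpos : (0:Int) < d := by omega
      have hcI : (0:Int) ≤ PySem.Int.floordiv (PySem.Str.len gl[f.toNat]) d := by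
        rw [PySem.Int.floordiv_eq_ediv_of_pos hdpos]
        exact Int.ediv_nonneg hlen0 (by omega)
      have hc : PySem.Int.floordiv (PySem.Str.len gl[f.toNat]) d
          = (((PySem.Int.floordiv (PySem.Str.len gl[f.toNat]) d).toNat : Nat) : Int) :=
        (Int.toNat_of_nonneg hcI).symm
      rw [hq, divide_chunk_loop gl[f.toNat] _ _ hc (d - 1).toNat,
        PySem.List.slice?_none_none_neg_one, Option.getD_some,
        divide_insert_loop _ _ _ hmE,
        eraseIdx_take gl f.toNat (by omega), eraseIdx_drop gl f.toNat (by omega)]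
      rw [if_pos hd2]
      rw [PySem.List.slice_to_natCast]
      have h1 : ((f.toNat : Int) + 1) = ((f.toNat + 1 : Nat) : Int) := by push_cast; ring
      rw [h1, PySem.List.slice_from_natCast]
      dsimp only
      congr 2
      -- chunks ++ [last chunk]
      rw [hq, PySem.List.pyRange_zero, List.map_map]
      simp only [Int.toNat_natCast]
      congr 1
      · apply List.map_congr_left
        intro k hk
        congr 2
        · push_cast
          rw [← hc]
        · push_cast
          rw [← hc]
      · congr 2
        push_cast
        rw [← hc]
    · -- divisor ≤ 1: no division happens, the element is re-inserted whole
      rw [PySem.List.pyRange_one_eq_nil (by omega)]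
      simp only [List.foldl_nil, List.nil_append]
      rw [PySem.List.slice?_none_none_neg_one, Option.getD_some,
        divide_insert_loop [gl[f.toNat]] _ _ hmE,
        eraseIdx_take gl f.toNat (by omega), eraseIdx_drop gl f.toNat (by omega)]
      rw [if_neg hd2]
      rw [PySem.List.slice_to_natCast]
      have h1 : ((f.toNat : Int) + 1) = ((f.toNat + 1 : Nat) : Int) := by push_cast; ring
      rw [h1, PySem.List.slice_from_natCast]
  · -- negative index: ¬D_ forces first_index = -len(given_list) and divisor ≤ 2
    have hf' : f < 0 := by omega
    have hcond : f + (gl.length : Int) = 0 ∧ d ≤ 2 := by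
      by_contra hc
      exact hnd ⟨hf', hc⟩
    have hfm : f = -(gl.length : Int) := by omega
    rw [hfm]
    exact divide_neg_case gl d (by omega) hcond.2

theorem divide_elements_changed : Claim_changed_divide_elements := by
  unfold Claim_changed_divide_elements; decide
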